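-- pv_equiv track=rewrite | github.com/mitchtz/Daily_Programmer | 259[H] - Operator Number System/NOS_Finder.py | nos2dec
-- ===== SOURCE A (Python) =====
-- def nos2dec(num_in):
-- 	tot = 0
-- 	for num,i in enumerate(num_in):
-- 		if i == "0":
-- 			tot += num+1
-- 		elif i == "1":
-- 			tot -= num+1
-- 		else:
-- 			tot *= num+1
-- 	return tot
-- ===== SOURCE B (Python) =====
-- def nos2dec(num_in):
--     result, mult, seg, pending = 0, 1, 0, []
--     for i, c in reversed(list(enumerate(num_in))):
--         if c in ("0", "1"):
--             if pending:
--                 result += seg * mult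
--                 for v in pending:
--                     mult *= v
--                 seg = 0
--                 pending = []
--             seg = seg + i + 1 if c == "0" else seg - (i + 1)
--         else:
--             pending.append(i + 1)
--     return result + seg * mult
-- ===== Notes on version B (the rewrite author's own statement) =====
-- stated objective: alternative
-- what changed: B scans the string in reverse with a (result, mult, seg, pending) state: add/subtract terms accumulate in a cheap segment sum, multiply-operators are queued lazily, and the queue is folded into the running product (scaling the banked segment) only when an earlier term needs it — instead of A's single left-to-right total multiplied in place.
import Mathlib
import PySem

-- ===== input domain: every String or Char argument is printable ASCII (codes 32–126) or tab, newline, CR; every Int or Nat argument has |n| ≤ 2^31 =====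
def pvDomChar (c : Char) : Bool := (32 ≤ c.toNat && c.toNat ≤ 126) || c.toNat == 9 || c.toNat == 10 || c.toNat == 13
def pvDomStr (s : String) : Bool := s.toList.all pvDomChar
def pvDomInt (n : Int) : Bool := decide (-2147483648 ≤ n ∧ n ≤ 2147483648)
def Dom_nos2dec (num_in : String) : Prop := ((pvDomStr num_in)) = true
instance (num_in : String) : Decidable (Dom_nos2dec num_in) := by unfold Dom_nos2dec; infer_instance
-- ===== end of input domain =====

-- B evaluates the operator string right-to-left, summing each run of add/subtract terms and scaling
-- it by the product of later multiply-operators at each multiplier (alternative decomposition, same O cost).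


-- ===== PORT A =====
-- step of A's loop: running total updated per (index, char)
def nosStepA (tot : Int) (p : Int × Char) : Int :=
  if p.2 = '0' then tot + (p.1 + 1)
  else if p.2 = '1' then tot - (p.1 + 1)
  else tot * (p.1 + 1)

def nos2dec (num_in : String) : Int :=
  (PySem.List.enumerate num_in.toList).foldl nosStepA 0

-- ===== PORT B =====
-- flush: fold the pending multipliers into mult and bank the current segment (the 'if pending:' body)
def nosFlush (s : Int × Int × Int × List Int) : Int × Int × Int × List Int :=
  if s.2.2.2 = [] then s
  else (s.1 + s.2.2.1 * s.2.1, s.2.2.2.foldl (· * ·) s.2.1, 0, ([] : List Int))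

-- step of B's reversed loop: state (result, mult, seg, pending)
def nosStepB (s : Int × Int × Int × List Int) (p : Int × Char) : Int × Int × Int × List Int :=
  if p.2 = '0' ∨ p.2 = '1' then
    let t := nosFlush s
    if p.2 = '0' then (t.1, t.2.1, t.2.2.1 + p.1 + 1, t.2.2.2)
    else (t.1, t.2.1, t.2.2.1 - (p.1 + 1), t.2.2.2)
  else (s.1, s.2.1, s.2.2.1, s.2.2.2 ++ [p.1 + 1])

def nos2dec_alt (num_in : String) : Int :=
  let s := (PySem.List.enumerate num_in.toList).reverse.foldl nosStepB (0, 1, 0, ([] : List Int))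
  s.1 + s.2.2.1 * s.2.1

-- ===== PRECONDITION & SPEC =====
def Spec_nos2dec (num_in : String) (out : Int) : Prop := out = nos2dec_alt num_in
instance (num_in : String) (out : Int) : Decidable (Spec_nos2dec num_in out) := by unfold Spec_nos2dec; infer_instance

-- ===== CLAIM (what is proved, stated in full; the proofs are below) =====
def Claim_equal_nos2dec : Prop := ∀ (num_in : String), Dom_nos2dec num_in → Spec_nos2dec num_in (nos2dec num_in)

-- ===== LEMMAS AND PROOFS =====
-- One step of B's reversed loop, read through the abstraction
-- res + seg * mult + tot * (pending folded into mult), performs exactly A's step on tot.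
theorem nos_step_inv (s : Int × Int × Int × List Int) (p : Int × Char) (tot : Int) :
    (nosStepB s p).1 + (nosStepB s p).2.2.1 * (nosStepB s p).2.1
        + tot * ((nosStepB s p).2.2.2.foldl (· * ·) (nosStepB s p).2.1)
      = s.1 + s.2.2.1 * s.2.1 + (nosStepA tot p) * (s.2.2.2.foldl (· * ·) s.2.1) := by
  unfold nosStepA nosStepB nosFlush
  by_cases h0 : p.2 = '0' <;> by_cases h1 : p.2 = '1' <;>
    by_cases hp : s.2.2.2 = [] <;>
      simp [h0, h1, hp, List.foldl_append] <;> ring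

-- Key invariant: A's left fold from tot equals res + seg * mult + tot * (pending folded into
-- mult), where (res, mult, seg, pending) is B's right-to-left fold over the same pair list.
theorem nos_key (l : List (Int × Char)) : ∀ (tot : Int),
    l.foldl nosStepA tot =
      (l.reverse.foldl nosStepB (0, 1, 0, ([] : List Int))).1 +
        (l.reverse.foldl nosStepB (0, 1, 0, ([] : List Int))).2.2.1 *
          (l.reverse.foldl nosStepB (0, 1, 0, ([] : List Int))).2.1 +
        tot * ((l.reverse.foldl nosStepB (0, 1, 0, ([] : List Int))).2.2.2.foldl (· * ·)
          (l.reverse.foldl nosStepB (0, 1, 0, ([] : List Int))).2.1) := by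
  induction l with
  | nil => intro tot; simp
  | cons p l ih =>
    intro tot
    have hrev : (p :: l).reverse.foldl nosStepB (0, 1, 0, ([] : List Int))
        = nosStepB (l.reverse.foldl nosStepB (0, 1, 0, ([] : List Int))) p := by
      simp [List.foldl_append]
    rw [List.foldl_cons, hrev, ih (nosStepA tot p)]
    exact (nos_step_inv (l.reverse.foldl nosStepB (0, 1, 0, ([] : List Int))) p tot).symm

-- ===== VERDICT (by name: the statement is the Claim_ definition above) =====
theorem nos2dec_spec : Claim_equal_nos2dec := by
  intro num_in _
  unfold Spec_nos2dec nos2dec nos2dec_alt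
  simp only [nos_key]
  ring
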